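-- pv_equiv track=rewrite | github.com/eegmon/project | test.py | de_fibonacci_caesar
-- ===== SOURCE A (Python) =====
-- def fibonacci_sequence(n):
--     fibs = [1, 1]
--     for i in range(2, n):
--         fibs.append(fibs[-1] + fibs[-2])
--     return fibs
--
-- def de_fibonacci_caesar(cipher):
--     plain = ""
--     fibs = fibonacci_sequence(len(cipher))
--     for idx, ch in enumerate(cipher):
--         key = fibs[idx]
--         if ch.isalpha():
--             if ch.islower():
--                 plain += chr((ord(ch) - ord('a') - key) % 26 + ord('a'))
--             elif ch.isupper():
--                 plain += chr((ord(ch) - ord('A') - key) % 26 + ord('A'))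
--         else:
--             plain += ch
--     return plain
-- ===== SOURCE B (Python) =====
-- def de_fibonacci_caesar(cipher):
--     out = []
--     a, b = 1, 1  # Fibonacci keys reduced mod 26 on the fly
--     for ch in cipher:
--         if 'a' <= ch <= 'z':
--             out.append(chr((ord(ch) - ord('a') - a) % 26 + ord('a')))
--         elif 'A' <= ch <= 'Z':
--             out.append(chr((ord(ch) - ord('A') - a) % 26 + ord('A')))
--         else:
--             out.append(ch)
--         a, b = b, (a + b) % 26
--     return "".join(out)
-- ===== Notes on version B (the rewrite author's own statement) =====
-- stated objective: faster
-- what changed: B drops the precomputed big-integer Fibonacci list entirely and carries the Fibonacci key reduced mod 26 through a single pass (joining a char list at the end), instead of A's O(n)-size bignum table indexed per character.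
import Mathlib
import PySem

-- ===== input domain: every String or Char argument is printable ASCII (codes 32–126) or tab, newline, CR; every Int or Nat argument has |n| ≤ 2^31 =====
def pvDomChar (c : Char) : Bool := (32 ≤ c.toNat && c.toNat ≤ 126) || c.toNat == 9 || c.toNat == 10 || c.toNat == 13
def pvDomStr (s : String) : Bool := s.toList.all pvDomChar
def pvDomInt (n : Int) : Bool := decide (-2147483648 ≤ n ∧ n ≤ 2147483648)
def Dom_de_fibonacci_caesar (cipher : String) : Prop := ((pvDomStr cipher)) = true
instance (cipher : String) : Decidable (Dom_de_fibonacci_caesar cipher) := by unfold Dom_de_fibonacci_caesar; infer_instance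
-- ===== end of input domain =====

-- B replaces A's precomputed big-integer Fibonacci table with a single pass that
-- carries the Fibonacci key reduced mod 26 (objective: faster, asymptotically).

-- ===== PORT A =====
def fibonacci_sequence (n : Int) : List Int :=
  (PySem.List.pyRange 2 n 1).foldl
    (fun fibs _ =>
      fibs ++ [((PySem.List.pyGet? fibs (-1)).getD 0) + ((PySem.List.pyGet? fibs (-2)).getD 0)])
    [1, 1]

def de_fibonacci_caesar (cipher : String) : String :=
  let fibs := fibonacci_sequence (PySem.Str.len cipher)
  (PySem.List.enumerate cipher.toList 0).foldl
    (fun plain p =>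
      let key := (PySem.List.pyGet? fibs p.1).getD 0
      if PySem.Chars.isalpha p.2 then
        if PySem.Chars.islower p.2 then
          plain ++ String.ofList [Char.ofNat (PySem.Int.mod ((p.2.toNat : Int) - ('a'.toNat : Int) - key) 26 + ('a'.toNat : Int)).toNat]
        else if PySem.Chars.isupper p.2 then
          plain ++ String.ofList [Char.ofNat (PySem.Int.mod ((p.2.toNat : Int) - ('A'.toNat : Int) - key) 26 + ('A'.toNat : Int)).toNat]
        else plain
      else plain ++ String.ofList [p.2])
    ""

-- ===== PORT B =====
def de_fibonacci_caesar_alt (cipher : String) : String :=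
  let st := cipher.toList.foldl
    (fun (st : List Char × Int × Int) ch =>
      let out :=
        if 'a' ≤ ch ∧ ch ≤ 'z' then
          st.1 ++ [Char.ofNat (PySem.Int.mod ((ch.toNat : Int) - ('a'.toNat : Int) - st.2.1) 26 + ('a'.toNat : Int)).toNat]
        else if 'A' ≤ ch ∧ ch ≤ 'Z' then
          st.1 ++ [Char.ofNat (PySem.Int.mod ((ch.toNat : Int) - ('A'.toNat : Int) - st.2.1) 26 + ('A'.toNat : Int)).toNat]
        else st.1 ++ [ch]
      (out, st.2.2, PySem.Int.mod (st.2.1 + st.2.2) 26))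
    ([], 1, 1)
  String.ofList st.1

-- ===== PRECONDITION & SPEC =====
def Spec_de_fibonacci_caesar (cipher : String) (out : String) : Prop := out = de_fibonacci_caesar_alt cipher
instance (cipher : String) (out : String) : Decidable (Spec_de_fibonacci_caesar cipher out) := by unfold Spec_de_fibonacci_caesar; infer_instance

-- ===== CLAIM (what is proved, stated in full; the proofs are below) =====
def Claim_equal_de_fibonacci_caesar : Prop := ∀ (cipher : String), Dom_de_fibonacci_caesar cipher → Spec_de_fibonacci_caesar cipher (de_fibonacci_caesar cipher)

-- ===== LEMMAS AND PROOFS =====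

/-- The mathematical Fibonacci sequence A tabulates (fib 0 = fib 1 = 1). -/
def pvFib : Nat → Int
  | 0 => 1
  | 1 => 1
  | n + 2 => pvFib n + pvFib (n + 1)

lemma fibonacci_sequence_eq (m : Nat) :
    fibonacci_sequence (m : Int) = (List.range (max 2 m)).map pvFib := by
  induction m with
  | zero => decide
  | succ k ih =>
    rcases Nat.lt_or_ge k 2 with hk | hk
    · interval_cases k <;> decide
    · have h2 : (2 : Int) ≤ (k : Int) := by exact_mod_cast hk
      have hr : PySem.List.pyRange 2 ((k : Int) + 1) 1
          = PySem.List.pyRange 2 (k : Int) 1 ++ [(k : Int)] :=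
        PySem.List.pyRange_one_succ_right h2
      have hcast : ((k + 1 : Nat) : Int) = (k : Int) + 1 := by push_cast; ring
      unfold fibonacci_sequence at *
      rw [hcast, hr, List.foldl_append, ih]
      have hmaxk : max 2 k = k := Nat.max_eq_right hk
      have hmax : max 2 (k + 1) = k + 1 := Nat.max_eq_right (by omega)
      rw [hmaxk, hmax]
      have hlen : ((List.range k).map pvFib).length = k := by simp
      have hget1 : (PySem.List.pyGet? ((List.range k).map pvFib) (-1)).getD 0 = pvFib (k - 1) := by
        simp [PySem.List.pyGet?, PySem.List.pyIdx?, hlen, show 1 ≤ k by omega,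
          List.getElem?_range (show k - 1 < k by omega)]
      have hget2 : (PySem.List.pyGet? ((List.range k).map pvFib) (-2)).getD 0 = pvFib (k - 2) := by
        simp [PySem.List.pyGet?, PySem.List.pyIdx?, hlen, h2,
          List.getElem?_range (show k - 2 < k by omega)]
      simp only [List.foldl_cons, List.foldl_nil, hget1, hget2]
      rw [List.range_succ, List.map_append]
      congr 1
      obtain ⟨j, rfl⟩ : ∃ j, k = j + 2 := ⟨k - 2, by omega⟩
      simp only [List.map_cons, List.map_nil]
      rw [show j + 2 - 1 = j + 1 from by omega, show j + 2 - 2 = j from by omega,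
          show pvFib (j + 2) = pvFib j + pvFib (j + 1) from rfl, Int.add_comm]

lemma lookup_fib (n j : Nat) (hj : j < n) :
    (PySem.List.pyGet? ((List.range n).map pvFib) (j : Int)).getD 0 = pvFib j := by
  have hlen : ((List.range n).map pvFib).length = n := by simp
  simp [PySem.List.pyGet?, PySem.List.pyIdx?, hlen, hj]

lemma mod_add_congr (x y : Int) :
    PySem.Int.mod (PySem.Int.mod x 26 + PySem.Int.mod y 26) 26 = PySem.Int.mod (x + y) 26 := by
  have h : (0 : Int) < 26 := by norm_num
  simp only [PySem.Int.mod_eq_emod_of_pos h]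
  omega

lemma main_loop (fibs : List Int) (cs : List Char) :
    ∀ (idx : Nat) (accA : String) (accB : List Char) (a b : Int),
    accA.toList = accB →
    a = PySem.Int.mod (pvFib idx) 26 →
    b = PySem.Int.mod (pvFib (idx + 1)) 26 →
    (∀ j, idx ≤ j → j < idx + cs.length → (PySem.List.pyGet? fibs (j : Int)).getD 0 = pvFib j) →
    ((PySem.List.enumerate cs (idx : Int)).foldl
      (fun plain p =>
        let key := (PySem.List.pyGet? fibs p.1).getD 0
        if PySem.Chars.isalpha p.2 then
          if PySem.Chars.islower p.2 then
            plain ++ String.ofList [Char.ofNat (PySem.Int.mod ((p.2.toNat : Int) - ('a'.toNat : Int) - key) 26 + ('a'.toNat : Int)).toNat]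
          else if PySem.Chars.isupper p.2 then
            plain ++ String.ofList [Char.ofNat (PySem.Int.mod ((p.2.toNat : Int) - ('A'.toNat : Int) - key) 26 + ('A'.toNat : Int)).toNat]
          else plain
        else plain ++ String.ofList [p.2]) accA).toList
    = (cs.foldl
        (fun (st : List Char × Int × Int) ch =>
          let out :=
            if 'a' ≤ ch ∧ ch ≤ 'z' then
              st.1 ++ [Char.ofNat (PySem.Int.mod ((ch.toNat : Int) - ('a'.toNat : Int) - st.2.1) 26 + ('a'.toNat : Int)).toNat]
            else if 'A' ≤ ch ∧ ch ≤ 'Z' then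
              st.1 ++ [Char.ofNat (PySem.Int.mod ((ch.toNat : Int) - ('A'.toNat : Int) - st.2.1) 26 + ('A'.toNat : Int)).toNat]
            else st.1 ++ [ch]
          (out, st.2.2, PySem.Int.mod (st.2.1 + st.2.2) 26))
        (accB, a, b)).1 := by
  induction cs with
  | nil => intro idx accA accB a b hacc _ _ _; simpa using hacc
  | cons c cs ih =>
    intro idx accA accB a b hacc ha hb hlook
    rw [PySem.List.enumerate_cons, List.foldl_cons, List.foldl_cons]
    have hkey : (PySem.List.pyGet? fibs ((idx : Nat) : Int)).getD 0 = pvFib idx :=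
      hlook idx le_rfl (by simp only [List.length_cons]; omega)
    have hcast : ((idx : Int) + 1) = ((idx + 1 : Nat) : Int) := by push_cast; ring
    rw [hcast]
    apply ih (idx + 1)
    · -- accumulators stay equal after one step
      simp only [hkey]
      by_cases hl : PySem.Chars.islower c = true
      · have hl' : 'a' ≤ c ∧ c ≤ 'z' := by
          simp [PySem.Chars.islower] at hl; exact hl
        simp [PySem.Chars.isalpha, hl, hl', ha, hacc, String.toList_ofList]
      · by_cases hu : PySem.Chars.isupper c = true
        · have hu' : 'A' ≤ c ∧ c ≤ 'Z' := by
            simp [PySem.Chars.isupper] at hu; exact hu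
          have hl' : ¬ ('a' ≤ c ∧ c ≤ 'z') := by
            simp [PySem.Chars.islower] at hl; simpa using hl
          simp [PySem.Chars.isalpha, hl, hu, hl', hu', ha, hacc, String.toList_ofList]
        · have hl' : ¬ ('a' ≤ c ∧ c ≤ 'z') := by
            simp [PySem.Chars.islower] at hl; simpa using hl
          have hu' : ¬ ('A' ≤ c ∧ c ≤ 'Z') := by
            simp [PySem.Chars.isupper] at hu; simpa using hu
          simp [PySem.Chars.isalpha, hl, hu, hl', hu', hacc, String.toList_ofList]
    · exact hb
    · rw [hb, ha, mod_add_congr]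
      have : pvFib (idx + 1 + 1) = pvFib idx + pvFib (idx + 1) := rfl
      rw [this]
    · intro j h1 h2
      exact hlook j (by omega) (by simp at h2 ⊢; omega)

-- ===== VERDICT (by name: the statement is the Claim_ definition above) =====
theorem de_fibonacci_caesar_spec : Claim_equal_de_fibonacci_caesar := by
  intro cipher _
  unfold Spec_de_fibonacci_caesar de_fibonacci_caesar de_fibonacci_caesar_alt
  apply String.ext
  simp only [String.toList_ofList]
  have hlen : PySem.Str.len cipher = (cipher.toList.length : Int) := by
    simp [PySem.Str.len]
  rw [hlen]
  have hfib := fibonacci_sequence_eq cipher.toList.length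
  rw [hfib]
  have := main_loop ((List.range (max 2 cipher.toList.length)).map pvFib) cipher.toList 0
    "" [] 1 1 rfl (by decide) (by decide)
    (fun j _ hj => lookup_fib _ j (by omega))
  simpa using this
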